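-- pv_equiv track=rewrite | github.com/raminrafi/Search-Engine-in-Python | a.py | occurencecount
-- ===== SOURCE A (Python) =====
-- def occurencecount(my_list): #termid counter for term occurences
--     counter = 0
--     mycountlist = []
--     mytempid = my_list[0]
--     for i in range(len(my_list)):
--         if my_list[i][0] != mytempid[0]:
--             mycountlist.append(counter)
--             counter = 1
--             mytempid = my_list[i]
--         else:
--             counter += 1
--     mycountlist.append(counter)
--     return mycountlist
-- ===== SOURCE B (Python) =====
-- def occurencecount(my_list):
--     heads = [row[0] for row in my_list]
--     n = len(heads)
--     cuts = [0] + [i for i in range(1, n) if heads[i] != heads[i - 1]] + [n]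
--     return [cuts[j + 1] - cuts[j] for j in range(len(cuts) - 1)]
-- ===== Notes on version B (the rewrite author's own statement) =====
-- stated objective: alternative
-- what changed: Replaces the stateful counter/temp scan by change-point detection: collect the boundary indices where the leading element changes, form the cut list [0]+bounds+[n], and return consecutive differences as the run lengths.
import Mathlib
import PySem

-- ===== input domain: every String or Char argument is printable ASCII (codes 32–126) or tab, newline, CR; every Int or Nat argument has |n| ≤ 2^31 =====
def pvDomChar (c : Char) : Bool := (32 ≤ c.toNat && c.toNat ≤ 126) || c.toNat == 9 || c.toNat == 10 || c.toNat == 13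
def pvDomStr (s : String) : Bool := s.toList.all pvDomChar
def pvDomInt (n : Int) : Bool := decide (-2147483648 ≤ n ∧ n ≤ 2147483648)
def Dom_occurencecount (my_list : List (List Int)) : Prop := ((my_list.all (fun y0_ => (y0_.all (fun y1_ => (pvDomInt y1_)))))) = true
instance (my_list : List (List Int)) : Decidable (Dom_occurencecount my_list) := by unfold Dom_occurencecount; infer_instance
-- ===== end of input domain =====

-- B restructures A's stateful counter scan into change-point detection (boundary indices) plus gap differencing; equal output proved on all non-empty lists of non-empty rows.

-- ===== PORT A =====
def occurencecount (my_list : List (List Int)) : List Int :=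
  let mytempid := PySem.List.pyGetD my_list 0 []
  let s := (PySem.List.pyRange 0 (my_list.length : Int) 1).foldl
      (fun (st : Int × List Int × List Int) i =>
        if PySem.List.pyGetD (PySem.List.pyGetD my_list i []) 0 (0 : Int) ≠ PySem.List.pyGetD st.2.2 0 0 then
          (1, st.2.1 ++ [st.1], PySem.List.pyGetD my_list i [])
        else
          (st.1 + 1, st.2.1, st.2.2))
      ((0 : Int), ([] : List Int), mytempid)
  s.2.1 ++ [s.1]

-- ===== PORT B =====
def occurencecount_alt (my_list : List (List Int)) : List Int :=
  let heads := my_list.map (fun row => PySem.List.pyGetD row 0 (0 : Int))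
  let n : Int := (heads.length : Int)
  let cuts := (0 : Int) :: ((PySem.List.pyRange 1 n 1).filter
      (fun i => decide (PySem.List.pyGetD heads i 0 ≠ PySem.List.pyGetD heads (i - 1) 0))) ++ [n]
  (PySem.List.pyRange 0 ((cuts.length : Int) - 1) 1).map
      (fun j => PySem.List.pyGetD cuts (j + 1) 0 - PySem.List.pyGetD cuts j 0)

-- ===== PRECONDITION & SPEC =====
-- Pre_ excludes exactly the inputs where Python A raises IndexError: the empty list (my_list[0]) and lists containing an empty row (row[0]).
def Pre_occurencecount (my_list : List (List Int)) : Prop :=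
  my_list ≠ [] ∧ ∀ row ∈ my_list, row ≠ []
instance (my_list : List (List Int)) : Decidable (Pre_occurencecount my_list) := by
  unfold Pre_occurencecount; infer_instance

def pvWitness_occurencecount : List (List Int) := [[1], [1], [2], [2], [2]]

def Spec_occurencecount (my_list : List (List Int)) (out : List Int) : Prop := out = occurencecount_alt my_list
instance (my_list : List (List Int)) (out : List Int) : Decidable (Spec_occurencecount my_list out) := by unfold Spec_occurencecount; infer_instance

-- ===== CLAIM (what is proved, stated in full; the proofs are below) =====
def Claim_equal_occurencecount : Prop := ∀ (my_list : List (List Int)), Dom_occurencecount my_list → Pre_occurencecount my_list → Spec_occurencecount my_list (occurencecount my_list)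

-- ===== LEMMAS AND PROOFS =====

-- A's run-length scan, as a recursion over the list of leading elements.
def runsA (c : Int) (h : Int) : List Int → List Int
  | [] => [c]
  | x :: xs => if x ≠ h then c :: runsA 1 x xs else runsA (c + 1) h xs

-- A's loop body.
def stepA : (Int × List Int × List Int) → List Int → (Int × List Int × List Int) :=
  fun st cur =>
    if PySem.List.pyGetD cur 0 (0 : Int) ≠ PySem.List.pyGetD st.2.2 0 0 then
      (1, st.2.1 ++ [st.1], cur)
    else
      (st.1 + 1, st.2.1, st.2.2)

-- B's boundary-index list of a heads list.
def bnds (hs : List Int) : List Int :=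
  (PySem.List.pyRange 1 (hs.length : Int) 1).filter
    (fun i => decide (PySem.List.pyGetD hs i 0 ≠ PySem.List.pyGetD hs (i - 1) 0))

-- consecutive differences
def df (l : List Int) : List Int := List.zipWith (fun a b => b - a) l l.tail

theorem runsA_succ (xs : List Int) : ∀ (c h : Int),
    runsA (c + 1) h xs = ((runsA c h xs).headI + 1) :: (runsA c h xs).tail := by
  induction xs with
  | nil => intro c h; simp [runsA]
  | cons x xs ih =>
    intro c h
    by_cases hx : x ≠ h
    · simp [runsA, hx]
    · simp only [runsA, if_neg hx]
      exact ih (c + 1) h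

theorem foldA (l : List (List Int)) : ∀ (c : Int) (acc : List Int) (temp : List Int),
    (l.foldl (stepA) (c, acc, temp)).2.1 ++ [(l.foldl (stepA) (c, acc, temp)).1]
      = acc ++ runsA c (PySem.List.pyGetD temp 0 0) (l.map (fun row => PySem.List.pyGetD row 0 0)) := by
  induction l with
  | nil => intro c acc temp; simp [runsA]
  | cons r l ih =>
    intro c acc temp
    by_cases hc : PySem.List.pyGetD r 0 (0 : Int) ≠ PySem.List.pyGetD temp 0 0
    · simp only [List.foldl_cons, List.map_cons, stepA, if_pos hc, runsA, ih]
      simp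
    · simp only [List.foldl_cons, List.map_cons, stepA, if_neg hc, runsA, ih]

theorem df_map_add_one (l : List Int) : df (l.map (· + 1)) = df l := by
  induction l with
  | nil => rfl
  | cons a t ih =>
    cases t with
    | nil => rfl
    | cons b t' =>
      simp only [List.map_cons] at ih ⊢
      simp only [df, List.tail_cons, List.zipWith_cons_cons] at ih ⊢
      rw [ih]
      congr 1
      ring

theorem pyRange_succ_shift (a b : Int) :
    PySem.List.pyRange (a + 1) (b + 1) 1 = (PySem.List.pyRange a b 1).map (· + 1) := by
  rw [PySem.List.pyRange_one, PySem.List.pyRange_one, List.map_map]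
  have : b + 1 - (a + 1) = b - a := by ring
  rw [this]
  apply List.map_congr_left
  intro k _
  simp only [Function.comp]
  ring

theorem pyGetD_cons_succ (x : Int) (l : List Int) (i : Int) (hi : 0 ≤ i) :
    PySem.List.pyGetD (x :: l) (i + 1) 0 = PySem.List.pyGetD l i 0 := by
  obtain ⟨n, rfl⟩ := Int.eq_ofNat_of_zero_le hi
  have h1 : ((n : Int) + 1) = ((n + 1 : Nat) : Int) := by push_cast; ring
  rw [h1, PySem.List.pyGetD_natCast, PySem.List.pyGetD_natCast]
  rfl

theorem bnds_cons (x : Int) (l : List Int) (hl : l ≠ []) :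
    bnds (x :: l) = (if PySem.List.pyGetD l 0 0 ≠ x then [1] else []) ++ (bnds l).map (· + 1) := by
  have hlen : 0 < l.length := List.length_pos_iff.mpr hl
  have h1 : ((x :: l).length : Int) = (l.length : Int) + 1 := by simp
  unfold bnds
  rw [h1]
  have h2 : PySem.List.pyRange 1 ((l.length : Int) + 1) 1
      = 1 :: PySem.List.pyRange 2 ((l.length : Int) + 1) 1 := by
    exact PySem.List.pyRange_one_cons (by omega)
  rw [h2]
  have h3 : PySem.List.pyRange 2 ((l.length : Int) + 1) 1
      = (PySem.List.pyRange 1 (l.length : Int) 1).map (· + 1) := by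
    have := pyRange_succ_shift 1 (l.length : Int)
    norm_num at this
    exact this
  rw [h3, List.filter_cons, List.filter_map]
  have h4 : ∀ i ∈ PySem.List.pyRange 1 (l.length : Int) 1,
      (decide (PySem.List.pyGetD (x :: l) (i + 1) 0 ≠ PySem.List.pyGetD (x :: l) (i + 1 - 1) 0))
        = (decide (PySem.List.pyGetD l i 0 ≠ PySem.List.pyGetD l (i - 1) 0)) := by
    intro i hi
    have hi1 : 1 ≤ i := (PySem.List.mem_pyRange_one.mp hi).1
    have e1 : PySem.List.pyGetD (x :: l) (i + 1) 0 = PySem.List.pyGetD l i 0 :=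
      pyGetD_cons_succ x l i (by omega)
    have e2 : PySem.List.pyGetD (x :: l) (i + 1 - 1) 0 = PySem.List.pyGetD l (i - 1) 0 := by
      have : i + 1 - 1 = (i - 1) + 1 := by ring
      rw [this]
      exact pyGetD_cons_succ x l (i - 1) (by omega)
    rw [e1, e2]
  have h5 : List.filter ((fun i => decide (PySem.List.pyGetD (x :: l) i 0 ≠ PySem.List.pyGetD (x :: l) (i - 1) 0)) ∘ (· + 1))
        (PySem.List.pyRange 1 (l.length : Int) 1)
      = List.filter (fun i => decide (PySem.List.pyGetD l i 0 ≠ PySem.List.pyGetD l (i - 1) 0))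
        (PySem.List.pyRange 1 (l.length : Int) 1) := by
    apply List.filter_congr
    intro i hi
    exact h4 i hi
  rw [h5]
  have hcond : PySem.List.pyGetD (x :: l) 1 0 = PySem.List.pyGetD l 0 0 := by
    have := pyGetD_cons_succ x l 0 le_rfl
    norm_num at this
    exact this
  simp only [show ((1 : Int) - 1) = 0 from rfl, PySem.List.pyGetD_zero_cons, hcond]
  by_cases hne : PySem.List.pyGetD l 0 0 ≠ x
  · simp [hne]
  · simp [hne]

theorem map_diff_eq_df (c : List Int) :
    (PySem.List.pyRange 0 ((c.length : Int) - 1) 1).map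
        (fun j => PySem.List.pyGetD c (j + 1) 0 - PySem.List.pyGetD c j 0) = df c := by
  induction c with
  | nil =>
    rw [PySem.List.pyRange_one_eq_nil (by norm_num)]
    rfl
  | cons x l ih =>
    cases l with
    | nil =>
      rw [show (([x] : List Int).length : Int) - 1 = 0 by simp]
      rw [PySem.List.pyRange_one_eq_nil le_rfl]
      rfl
    | cons y t =>
      have hlen : ((x :: y :: t).length : Int) - 1 = (t.length : Int) + 1 := by
        simp
      rw [hlen]
      rw [PySem.List.pyRange_one_cons (by omega : (0 : Int) < (t.length : Int) + 1)]
      rw [pyRange_succ_shift 0 (t.length : Int), List.map_cons, List.map_map]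
      have hf0 : PySem.List.pyGetD (x :: y :: t) (0 + 1) 0 - PySem.List.pyGetD (x :: y :: t) 0 0 = y - x := by
        have := pyGetD_cons_succ x (y :: t) 0 le_rfl
        simp only [PySem.List.pyGetD_zero_cons] at this ⊢
        rw [this]
      have hcomp : List.map ((fun j => PySem.List.pyGetD (x :: y :: t) (j + 1) 0 - PySem.List.pyGetD (x :: y :: t) j 0) ∘ (· + 1))
            (PySem.List.pyRange 0 (t.length : Int) 1)
          = List.map (fun j => PySem.List.pyGetD (y :: t) (j + 1) 0 - PySem.List.pyGetD (y :: t) j 0)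
            (PySem.List.pyRange 0 (t.length : Int) 1) := by
        apply List.map_congr_left
        intro j hj
        have hj0 : 0 ≤ j := (PySem.List.mem_pyRange_one.mp hj).1
        simp only [Function.comp]
        rw [pyGetD_cons_succ x (y :: t) (j + 1) (by omega), pyGetD_cons_succ x (y :: t) j hj0]
      have ihlen : ((y :: t).length : Int) - 1 = (t.length : Int) := by simp
      rw [ihlen] at ih
      rw [hf0, hcomp, ih]
      rfl

-- B's cut-differencing equals A's scan, for any heads list h :: t.
theorem bcore_eq_runsA (t : List Int) : ∀ (h : Int),
    df ((0 : Int) :: (bnds (h :: t) ++ [((h :: t).length : Int)])) = runsA 1 h t := by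
  induction t with
  | nil =>
    intro h
    have : bnds [h] = [] := by
      unfold bnds
      rw [show (([h] : List Int).length : Int) = 1 by simp, PySem.List.pyRange_one_eq_nil le_rfl]
      rfl
    rw [this]
    rfl
  | cons y t' ih =>
    intro h
    rw [bnds_cons h (y :: t') (by simp), PySem.List.pyGetD_zero_cons]
    have hlen : (((h :: y :: t') : List Int).length : Int) = ((y :: t').length : Int) + 1 := by simp
    rw [hlen]
    by_cases hy : y = h
    · -- run continues: cuts = 0 :: map (+1) (bnds (y::t') ++ [n'])
      subst hy
      rw [if_neg (by simp), List.nil_append]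
      have hM : ((bnds (y :: t')).map (· + 1)) ++ [((y :: t').length : Int) + 1]
          = (bnds (y :: t') ++ [((y :: t').length : Int)]).map (· + 1) := by
        simp
      rw [hM]
      have hIH := ih y
      rcases hL : bnds (y :: t') ++ [((y :: t').length : Int)] with _ | ⟨a, L'⟩
      · exact absurd hL (by simp)
      · rw [hL] at hIH
        have hdf1 : df ((0 : Int) :: (a :: L').map (· + 1)) = (a + 1) :: df (a :: L') := by
          simp only [List.map_cons]
          have e1 : df ((0 : Int) :: (a + 1) :: L'.map (· + 1)) = (a + 1 - 0) :: df ((a + 1) :: L'.map (· + 1)) := rfl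
          rw [e1]
          have e2 : ((a + 1) :: L'.map (· + 1)) = (a :: L').map (· + 1) := by simp
          rw [e2, df_map_add_one]
          norm_num
        rw [hdf1]
        have hdf0 : df ((0 : Int) :: a :: L') = a :: df (a :: L') := by
          have e1 : df ((0 : Int) :: a :: L') = (a - 0) :: df (a :: L') := rfl
          rw [e1]; norm_num
        rw [hdf0] at hIH
        have hr : runsA 1 y (y :: t') = runsA (1 + 1) y t' := by
          simp [runsA]
        rw [hr, runsA_succ, ← hIH]
        simp
    · -- boundary at index 1
      rw [if_pos (by simpa using hy), List.singleton_append, List.cons_append]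
      have hM : (1 : Int) :: ((bnds (y :: t')).map (· + 1) ++ [((y :: t').length : Int) + 1])
          = ((0 : Int) :: (bnds (y :: t') ++ [((y :: t').length : Int)])).map (· + 1) := by
        simp
      rw [hM]
      have hdf : df ((0 : Int) :: ((0 : Int) :: (bnds (y :: t') ++ [((y :: t').length : Int)])).map (· + 1))
          = 1 :: df ((0 : Int) :: (bnds (y :: t') ++ [((y :: t').length : Int)])) := by
        rw [List.map_cons]
        have e1 : df ((0 : Int) :: ((0 : Int) + 1) :: (bnds (y :: t') ++ [((y :: t').length : Int)]).map (· + 1))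
            = ((0 : Int) + 1 - 0) :: df (((0 : Int) + 1) :: (bnds (y :: t') ++ [((y :: t').length : Int)]).map (· + 1)) := rfl
        rw [e1]
        have e2 : (((0 : Int) + 1) :: (bnds (y :: t') ++ [((y :: t').length : Int)]).map (· + 1))
            = ((0 : Int) :: (bnds (y :: t') ++ [((y :: t').length : Int)])).map (· + 1) := by simp
        rw [e2, df_map_add_one]
        norm_num
      rw [hdf, ih y]
      simp [runsA, hy]

-- ===== VERDICT (by name: the statement is the Claim_ definition above) =====
theorem occurencecount_spec : Claim_equal_occurencecount := by
  intro my_list _ hpre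
  unfold Spec_occurencecount
  obtain ⟨hne, -⟩ := hpre
  rcases my_list with _ | ⟨r, rest⟩
  · exact absurd rfl hne
  -- A side
  have hA : occurencecount (r :: rest)
      = runsA 1 (PySem.List.pyGetD r 0 0) (rest.map (fun row => PySem.List.pyGetD row 0 0)) := by
    show ((PySem.List.pyRange 0 (((r :: rest) : List (List Int)).length : Int) 1).foldl
        (fun (st : Int × List Int × List Int) i =>
          if PySem.List.pyGetD (PySem.List.pyGetD (r :: rest) i []) 0 (0 : Int) ≠ PySem.List.pyGetD st.2.2 0 0 then
            (1, st.2.1 ++ [st.1], PySem.List.pyGetD (r :: rest) i [])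
          else
            (st.1 + 1, st.2.1, st.2.2))
        ((0 : Int), ([] : List Int), PySem.List.pyGetD (r :: rest) 0 [])).2.1
      ++ [((PySem.List.pyRange 0 (((r :: rest) : List (List Int)).length : Int) 1).foldl
        (fun (st : Int × List Int × List Int) i =>
          if PySem.List.pyGetD (PySem.List.pyGetD (r :: rest) i []) 0 (0 : Int) ≠ PySem.List.pyGetD st.2.2 0 0 then
            (1, st.2.1 ++ [st.1], PySem.List.pyGetD (r :: rest) i [])
          else
            (st.1 + 1, st.2.1, st.2.2))
        ((0 : Int), ([] : List Int), PySem.List.pyGetD (r :: rest) 0 [])).1] = _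
    have hbr : (PySem.List.pyRange 0 (((r :: rest) : List (List Int)).length : Int) 1).foldl
        (fun (st : Int × List Int × List Int) i =>
          if PySem.List.pyGetD (PySem.List.pyGetD (r :: rest) i []) 0 (0 : Int) ≠ PySem.List.pyGetD st.2.2 0 0 then
            (1, st.2.1 ++ [st.1], PySem.List.pyGetD (r :: rest) i [])
          else
            (st.1 + 1, st.2.1, st.2.2))
        ((0 : Int), ([] : List Int), PySem.List.pyGetD (r :: rest) 0 [])
        = (r :: rest).foldl stepA ((0 : Int), ([] : List Int), PySem.List.pyGetD (r :: rest) 0 []) :=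
      PySem.List.foldl_pyRange_zero_pyGetD' (r :: rest) [] stepA
        ((0 : Int), ([] : List Int), PySem.List.pyGetD (r :: rest) 0 [])
    rw [hbr]
    rw [foldA (r :: rest) 0 [] (PySem.List.pyGetD (r :: rest) 0 [])]
    rw [List.nil_append, PySem.List.pyGetD_zero_cons, List.map_cons]
    simp [runsA]
  -- B side
  have hB : occurencecount_alt (r :: rest)
      = runsA 1 (PySem.List.pyGetD r 0 0) (rest.map (fun row => PySem.List.pyGetD row 0 0)) := by
    show (PySem.List.pyRange 0
          ((((0 : Int) :: (bnds ((r :: rest).map (fun row => PySem.List.pyGetD row 0 (0 : Int)))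
              ++ [(((r :: rest).map (fun row => PySem.List.pyGetD row 0 (0 : Int))).length : Int)])).length : Int) - 1) 1).map
        (fun j => PySem.List.pyGetD ((0 : Int) :: (bnds ((r :: rest).map (fun row => PySem.List.pyGetD row 0 (0 : Int)))
              ++ [(((r :: rest).map (fun row => PySem.List.pyGetD row 0 (0 : Int))).length : Int)])) (j + 1) 0
          - PySem.List.pyGetD ((0 : Int) :: (bnds ((r :: rest).map (fun row => PySem.List.pyGetD row 0 (0 : Int)))
              ++ [(((r :: rest).map (fun row => PySem.List.pyGetD row 0 (0 : Int))).length : Int)])) j 0) = _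
    rw [map_diff_eq_df]
    have hmap : (r :: rest).map (fun row => PySem.List.pyGetD row 0 (0 : Int))
        = PySem.List.pyGetD r 0 0 :: rest.map (fun row => PySem.List.pyGetD row 0 0) := by simp
    rw [hmap]
    exact bcore_eq_runsA (rest.map (fun row => PySem.List.pyGetD row 0 0)) (PySem.List.pyGetD r 0 0)
  rw [hA, hB]
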